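-- pv_equiv track=rewrite | github.com/elafontaine/Euler_project | Problem11.py | finding_the_x_highest_adjacent_number_0_degree
-- ===== SOURCE A (Python) =====
-- import functools
-- import operator
-- import operator as operator
--
-- def finding_the_x_highest_adjacent_number_0_degree(number, grid_array):
--     current_array = [1 for x in range(number)]
--     for index_row in range(len(grid_array)):
--         for index_column in range(len(grid_array) - number + 1):
--             accumulator = 1
--             for index in range(number):
--                 accumulator *= grid_array[index_row][index_column + index]
--             if accumulator > functools.reduce(operator.mul, current_array):
--                 for index2 in range(number):
--                     current_array[index2] = grid_array[index_row][index_column + index2]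
--     return current_array
-- ===== SOURCE B (Python) =====
-- def finding_the_x_highest_adjacent_number_0_degree(number, grid_array):
--     cols = len(grid_array) - number + 1
--     best = [1 for _ in range(number)]
--     best_prod = 1
--     for row in grid_array:
--         if cols > 0:
--             zeros = 0
--             prod = 1
--             for v in row[:number]:
--                 if v == 0:
--                     zeros += 1
--                 else:
--                     prod *= v
--             for c in range(cols):
--                 if c > 0:
--                     out = row[c - 1]
--                     new = row[c + number - 1]
--                     if out == 0:
--                         zeros -= 1
--                     else:
--                         prod //= out
--                     if new == 0:
--                         zeros += 1
--                     else:
--                         prod *= new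
--                 p = 0 if zeros else prod
--                 if p > best_prod:
--                     best = row[c:c + number]
--                     best_prod = p
--     return best
-- ===== Notes on version B (the rewrite author's own statement) =====
-- stated objective: alternative
-- what changed: B replaces A's per-window recomputation (an inner product loop over the window plus a functools.reduce over the current best array for every window) with a per-row sliding window that maintains a running product of the window's nonzero entries and a zero counter, updating both incrementally from column to column and caching the best product.
import Mathlib
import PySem

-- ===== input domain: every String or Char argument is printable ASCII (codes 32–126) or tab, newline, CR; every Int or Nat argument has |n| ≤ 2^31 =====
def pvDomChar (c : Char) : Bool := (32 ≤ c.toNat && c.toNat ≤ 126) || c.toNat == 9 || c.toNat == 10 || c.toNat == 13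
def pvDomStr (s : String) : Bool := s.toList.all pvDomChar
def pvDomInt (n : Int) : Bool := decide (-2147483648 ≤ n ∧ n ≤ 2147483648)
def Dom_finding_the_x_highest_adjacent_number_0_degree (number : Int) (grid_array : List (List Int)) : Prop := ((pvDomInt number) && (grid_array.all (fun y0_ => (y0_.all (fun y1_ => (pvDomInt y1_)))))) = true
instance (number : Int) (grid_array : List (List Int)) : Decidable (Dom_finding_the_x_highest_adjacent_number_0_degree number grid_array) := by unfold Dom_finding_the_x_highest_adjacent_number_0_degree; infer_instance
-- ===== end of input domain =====

-- B (alternative): a sliding window keeps a running product of the window's nonzero entries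
-- and a zero counter, updated incrementally from column to column, instead of A's per-window
-- product recomputation (plus a functools.reduce over the current best).

-- ===== PORT A =====
-- functools.reduce(operator.mul, l); Python raises TypeError on [], which Pre_ excludes (default 1 there).
def pvReduceMul (l : List Int) : Int :=
  match l with
  | [] => 1
  | h :: t => t.foldl (· * ·) h

-- body of A's 'for index_column in range(len(grid_array) - number + 1)' loop, for one row
def pvRowA (number nI : Int) (row : List Int) (cur0 : List Int) : List Int :=
  (PySem.List.pyRange 0 (nI - number + 1) 1).foldl (fun cur index_column =>
    let accumulator := (PySem.List.pyRange 0 number 1).foldl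
      (fun acc index => acc * PySem.List.pyGetD row (index_column + index) 0) 1
    if accumulator > pvReduceMul cur then
      (PySem.List.pyRange 0 number 1).foldl
        (fun arr index2 => arr.set index2.toNat (PySem.List.pyGetD row (index_column + index2) 0)) cur
    else cur) cur0

def finding_the_x_highest_adjacent_number_0_degree (number : Int) (grid_array : List (List Int)) : List Int :=
  (PySem.List.pyRange 0 (grid_array.length : Int) 1).foldl
    (fun cur index_row => pvRowA number (grid_array.length : Int) (PySem.List.pyGetD grid_array index_row []) cur)
    ((PySem.List.pyRange 0 number 1).map (fun _ => (1 : Int)))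

-- ===== PORT B =====
-- Source B's per-row sliding window: state ((zeros, prod), (best, best_prod)); the first column
-- initialises (zeros, prod) from row[:number], later columns update it incrementally.
def pvRowB (number cols : Int) (row : List Int) (st0 : List Int × Int) : List Int × Int :=
  if cols > 0 then
    let zp0 : Int × Int := (PySem.List.slice row none (some number)).foldl
      (fun zp v => if v = 0 then (zp.1 + 1, zp.2) else (zp.1, zp.2 * v)) (0, 1)
    ((PySem.List.pyRange 0 cols 1).foldl (fun (s : (Int × Int) × (List Int × Int)) c =>
      let zp :=
        if c > 0 then
          let outv := PySem.List.pyGetD row (c - 1) 0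
          let newv := PySem.List.pyGetD row (c + number - 1) 0
          let zp1 := if outv = 0 then (s.1.1 - 1, s.1.2) else (s.1.1, PySem.Int.floordiv s.1.2 outv)
          if newv = 0 then (zp1.1 + 1, zp1.2) else (zp1.1, zp1.2 * newv)
        else s.1
      let p := if zp.1 ≠ 0 then (0 : Int) else zp.2
      if p > s.2.2 then (zp, (PySem.List.slice row (some c) (some (c + number)), p))
      else (zp, s.2)) (zp0, st0)).2
  else st0

def finding_the_x_highest_adjacent_number_0_degree_alt (number : Int) (grid_array : List (List Int)) : List Int :=
  (grid_array.foldl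
    (fun st row => pvRowB number ((grid_array.length : Int) - number + 1) row st)
    ((PySem.List.pyRange 0 number 1).map (fun _ => (1 : Int)), 1)).1

-- ===== PRECONDITION & SPEC =====
-- Pre_ excludes exactly the inputs where the Python A raises: number ≤ 0 with a nonempty grid
-- (functools.reduce of an empty list, TypeError) and rows shorter than len(grid_array) when
-- number ≤ len(grid_array) (IndexError from A's column bound len(grid_array) - number + 1).
def Pre_finding_the_x_highest_adjacent_number_0_degree (number : Int) (grid_array : List (List Int)) : Prop :=
  (grid_array = [] ∨ 1 ≤ number) ∧
  (number ≤ (grid_array.length : Int) → ∀ row ∈ grid_array, (grid_array.length : Int) ≤ (row.length : Int))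
instance (number : Int) (grid_array : List (List Int)) : Decidable (Pre_finding_the_x_highest_adjacent_number_0_degree number grid_array) := by unfold Pre_finding_the_x_highest_adjacent_number_0_degree; infer_instance

def pvWitness_finding_the_x_highest_adjacent_number_0_degree : Int × List (List Int) := (2, [[1, 2], [3, 4]])

def Spec_finding_the_x_highest_adjacent_number_0_degree (number : Int) (grid_array : List (List Int)) (out : List Int) : Prop := out = finding_the_x_highest_adjacent_number_0_degree_alt number grid_array
instance (number : Int) (grid_array : List (List Int)) (out : List Int) : Decidable (Spec_finding_the_x_highest_adjacent_number_0_degree number grid_array out) := by unfold Spec_finding_the_x_highest_adjacent_number_0_degree; infer_instance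

-- ===== CLAIM (what is proved, stated in full; the proofs are below) =====
def Claim_equal_finding_the_x_highest_adjacent_number_0_degree : Prop := ∀ (number : Int) (grid_array : List (List Int)), Dom_finding_the_x_highest_adjacent_number_0_degree number grid_array → Pre_finding_the_x_highest_adjacent_number_0_degree number grid_array → Spec_finding_the_x_highest_adjacent_number_0_degree number grid_array (finding_the_x_highest_adjacent_number_0_degree number grid_array)

-- ===== LEMMAS AND PROOFS =====

-- proof-only middle implementation M: per column take the window as a slice and recompute
-- its full product; A = M (colfold_inv below) and M = B (rowM_eq_rowB below).
def pvRowM (number nI : Int) (row : List Int) (st0 : List Int × Int) : List Int × Int :=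
  (PySem.List.pyRange 0 (nI - number + 1) 1).foldl (fun st c =>
    let window := PySem.List.slice row (some c) (some (c + number))
    let p := window.foldl (fun p v => p * v) 1
    if p > st.2 then (window, p) else st) st0

-- zero count / nonzero product of a window, as Int
def pvCZ (l : List Int) : Int := (l.count 0 : Int)
def pvPNZ (l : List Int) : Int := (l.filter (fun v => v != 0)).prod

-- reduce(mul, l) is the fold of * from 1 (on [] our port's default 1 agrees)
theorem pvReduceMul_eq_foldl (l : List Int) : pvReduceMul l = l.foldl (· * ·) 1 := by
  cases l with
  | nil => rfl
  | cons h t => simp [pvReduceMul, List.foldl_cons, one_mul]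

theorem foldl_ones (m : Nat) : (List.replicate m (1 : Int)).foldl (· * ·) 1 = 1 := by
  induction m with
  | zero => rfl
  | succ k ih => simp [List.replicate_succ, List.foldl_cons, ih]

theorem map_range_getD (row : List Int) (c : Nat) :
    ∀ (m : Nat), c + m ≤ row.length →
      (List.range m).map (fun k => row.getD (c + k) 0) = (row.drop c).take m := by
  intro m
  induction m with
  | zero => intro _; simp
  | succ k ih =>
    intro h
    rw [List.range_succ, List.map_append, ih (by omega), List.take_succ]
    have h1 : c + k < row.length := by omega
    have h2 : k < (row.drop c).length := by simp; omega
    simp [List.getD, List.getElem?_eq_getElem h1, List.getElem?_eq_getElem h2,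
      List.getElem_drop]

theorem setloop_range (g : Nat → Int) :
    ∀ (m : Nat) (arr : List Int), m ≤ arr.length →
      (List.range m).foldl (fun a k => a.set k (g k)) arr = (List.range m).map g ++ arr.drop m := by
  intro m
  induction m with
  | zero => intro arr _; simp
  | succ k ih =>
    intro arr h
    have hk : k < arr.length := by omega
    have hdrop : arr.drop k = arr[k] :: arr.drop (k + 1) := List.drop_eq_getElem_cons hk
    rw [List.range_succ, List.foldl_append, ih arr (by omega), List.foldl_cons, List.foldl_nil,
        List.set_append_right _ _ (by simp), List.map_append, hdrop]
    simp
    rw [hdrop, List.set_cons_zero]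

-- one column step: under the in-range bounds, A's window product and window copy coincide with M's slice
theorem window_eq (row : List Int) (c number : Int) (hc : 0 ≤ c) (hn : 1 ≤ number)
    (hb : c + number ≤ (row.length : Int)) :
    PySem.List.slice row (some c) (some (c + number)) =
      (PySem.List.pyRange 0 number 1).map (fun i => PySem.List.pyGetD row (c + i) 0) := by
  obtain ⟨cn, rfl⟩ := Int.eq_ofNat_of_zero_le hc
  obtain ⟨m, rfl⟩ := Int.eq_ofNat_of_zero_le (by omega : (0 : Int) ≤ number)
  rw [PySem.List.slice_natCast_add, PySem.List.pyRange_one, List.map_map]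
  have hb' : cn + m ≤ row.length := by exact_mod_cast by omega
  rw [← map_range_getD row cn m hb']
  apply List.map_congr_left
  intro k _
  simp [Function.comp, List.getD]
  norm_cast
  rw [PySem.List.pyGetD_natCast]
  simp [List.getD]

theorem colfold_inv (number nI : Int) (row : List Int) (hn : 1 ≤ number)
    (hrow : number ≤ nI → nI ≤ (row.length : Int)) :
    ∀ (cs : List Int), (∀ c ∈ cs, 0 ≤ c ∧ c < nI - number + 1) →
    ∀ (cur : List Int), cur.length = number.toNat →
      (cs.foldl (fun cur index_column =>
          let accumulator := (PySem.List.pyRange 0 number 1).foldl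
            (fun acc index => acc * PySem.List.pyGetD row (index_column + index) 0) 1
          if accumulator > pvReduceMul cur then
            (PySem.List.pyRange 0 number 1).foldl
              (fun arr index2 => arr.set index2.toNat (PySem.List.pyGetD row (index_column + index2) 0)) cur
          else cur) cur
        = (cs.foldl (fun st c =>
            let window := PySem.List.slice row (some c) (some (c + number))
            let p := window.foldl (fun p v => p * v) 1
            if p > st.2 then (window, p) else st) (cur, cur.foldl (· * ·) 1)).1)
      ∧ (cs.foldl (fun st c =>
            let window := PySem.List.slice row (some c) (some (c + number))
            let p := window.foldl (fun p v => p * v) 1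
            if p > st.2 then (window, p) else st) (cur, cur.foldl (· * ·) 1)).2
          = ((cs.foldl (fun st c =>
            let window := PySem.List.slice row (some c) (some (c + number))
            let p := window.foldl (fun p v => p * v) 1
            if p > st.2 then (window, p) else st) (cur, cur.foldl (· * ·) 1)).1).foldl (· * ·) 1
      ∧ ((cs.foldl (fun st c =>
            let window := PySem.List.slice row (some c) (some (c + number))
            let p := window.foldl (fun p v => p * v) 1
            if p > st.2 then (window, p) else st) (cur, cur.foldl (· * ·) 1)).1).length = number.toNat := by
  obtain ⟨m, rfl⟩ := Int.eq_ofNat_of_zero_le (by omega : (0 : Int) ≤ number)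
  intro cs
  induction cs with
  | nil => intro _ cur hl; exact ⟨rfl, rfl, hl⟩
  | cons c cs ih =>
    intro hmem cur hl
    have hc := hmem c (by simp)
    have hb : c + (m : Int) ≤ (row.length : Int) := by
      have h1 : (m : Int) ≤ nI := by omega
      have := hrow h1
      omega
    have hw := window_eq row c m hc.1 hn hb
    have hwl : (PySem.List.slice row (some c) (some (c + (m : Int)))).length = (m : Int).toNat := by
      rw [hw]
      simp [PySem.List.length_pyRange_one]
    have hacc : (PySem.List.pyRange 0 (m : Int) 1).foldl
        (fun acc index => acc * PySem.List.pyGetD row (c + index) 0) 1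
        = (PySem.List.slice row (some c) (some (c + (m : Int)))).foldl (fun p v => p * v) 1 := by
      rw [hw, List.foldl_map]
    have hset : (PySem.List.pyRange 0 (m : Int) 1).foldl
        (fun arr index2 => arr.set index2.toNat (PySem.List.pyGetD row (c + index2) 0)) cur
        = PySem.List.slice row (some c) (some (c + (m : Int))) := by
      rw [hw, PySem.List.pyRange_zero_natCast, List.foldl_map, List.map_map]
      have hml : m ≤ cur.length := by omega
      have := setloop_range (fun k => PySem.List.pyGetD row (c + (k : Int)) 0) m cur hml
      simp only [Int.toNat_natCast] at this ⊢
      rw [this]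
      have hd : cur.drop m = [] := List.drop_eq_nil_of_le (by omega)
      rw [hd, List.append_nil]
      rfl
    simp only [List.foldl_cons]
    rw [hacc, pvReduceMul_eq_foldl, hset]
    by_cases hcond : (PySem.List.slice row (some c) (some (c + (m : Int)))).foldl (fun p v => p * v) 1
        > cur.foldl (· * ·) 1
    · simp only [hcond, if_pos, gt_iff_lt]
      have hres := ih (fun x hx => hmem x (by simp [hx]))
        (PySem.List.slice row (some c) (some (c + (m : Int)))) (by simpa using hwl)
      simpa using hres
    · simp only [hcond, gt_iff_lt, ite_false]
      exact ih (fun x hx => hmem x (by simp [hx])) cur hl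

theorem rowA_eq_rowM (number nI : Int) (row : List Int) (hn : 1 ≤ number)
    (hrow : number ≤ nI → nI ≤ (row.length : Int)) (cur : List Int) (p : Int)
    (hp : p = cur.foldl (· * ·) 1) (hl : cur.length = number.toNat) :
    pvRowA number nI row cur = (pvRowM number nI row (cur, p)).1
    ∧ (pvRowM number nI row (cur, p)).2 = ((pvRowM number nI row (cur, p)).1).foldl (· * ·) 1
    ∧ ((pvRowM number nI row (cur, p)).1).length = number.toNat := by
  subst hp
  have hcs : ∀ c ∈ PySem.List.pyRange 0 (nI - number + 1) 1, 0 ≤ c ∧ c < nI - number + 1 := by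
    intro c hc
    rw [PySem.List.mem_pyRange_one] at hc
    exact hc
  exact colfold_inv number nI row hn hrow _ hcs cur hl

-- (zeros, prod) initialisation: folding Source B's prefix loop over l from (z, p)
theorem init_zp (l : List Int) : ∀ (z p : Int),
    l.foldl (fun zp v => if v = 0 then (zp.1 + 1, zp.2) else (zp.1, zp.2 * v)) (z, p)
      = (z + pvCZ l, p * pvPNZ l) := by
  induction l with
  | nil => intro z p; simp [pvCZ, pvPNZ]
  | cons v t ih =>
    intro z p
    simp only [List.foldl_cons]
    by_cases hv : v = 0
    · rw [if_pos hv, ih, Prod.mk.injEq]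
      subst hv
      refine ⟨?_, ?_⟩
      · simp [pvCZ, List.count_cons]
        push_cast
        ring
      · simp [pvPNZ]
    · rw [if_neg hv, ih, Prod.mk.injEq]
      refine ⟨?_, ?_⟩
      · simp [pvCZ, List.count_cons, hv]
      · simp [pvPNZ, List.filter_cons, hv, mul_assoc]

-- p = 0 if zeros else prod  equals the full window product
theorem prod_char (l : List Int) :
    (if pvCZ l ≠ 0 then (0 : Int) else pvPNZ l) = l.foldl (· * ·) 1 := by
  rw [← List.prod_eq_foldl]
  by_cases h : pvCZ l ≠ 0
  · rw [if_pos h]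
    have h0 : (0 : Int) ∈ l := by
      unfold pvCZ at h
      rw [← List.count_pos_iff]
      omega
    exact (List.prod_eq_zero h0).symm
  · rw [if_neg h]
    unfold pvCZ at h
    have hc : l.count 0 = 0 := by omega
    have : l.filter (fun v => v != 0) = l := by
      apply List.filter_eq_self.mpr
      intro a ha
      have : a ≠ 0 := by
        intro rfl0
        subst rfl0
        have := List.count_pos_iff.mpr ha
        omega
      simpa using this
    rw [pvPNZ, this]

-- window decompositions used by the shift step
theorem window_cons (row : List Int) (cn j : Nat) (h : cn + (j + 1) ≤ row.length) :
    (row.drop cn).take (j + 1) = row[cn]'(by omega) :: (row.drop (cn + 1)).take j := by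
  rw [List.drop_eq_getElem_cons (by omega : cn < row.length), List.take_succ_cons]

theorem window_snoc (row : List Int) (cn j : Nat) (h : cn + 1 + (j + 1) ≤ row.length) :
    (row.drop (cn + 1)).take (j + 1)
      = (row.drop (cn + 1)).take j ++ [row[cn + (j + 1)]'(by omega)] := by
  have hlen : j < (row.drop (cn + 1)).length := by simp; omega
  rw [List.take_add_one, List.getElem?_eq_getElem hlen]
  simp [List.getElem_drop]
  congr 1
  omega

-- one shift of the (zeros, prod) pair: from window at column cn to column cn+1
theorem shift_zp (row : List Int) (cn m : Nat) (hm : 1 ≤ m) (h : cn + 1 + m ≤ row.length) :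
    (let outv := row[cn]'(by omega)
     let newv := row[cn + m]'(by omega)
     let zp1 := if outv = 0 then (pvCZ ((row.drop cn).take m) - 1, pvPNZ ((row.drop cn).take m))
       else (pvCZ ((row.drop cn).take m), PySem.Int.floordiv (pvPNZ ((row.drop cn).take m)) outv)
     if newv = 0 then (zp1.1 + 1, zp1.2) else (zp1.1, zp1.2 * newv))
    = (pvCZ ((row.drop (cn + 1)).take m), pvPNZ ((row.drop (cn + 1)).take m)) := by
  obtain ⟨j, rfl⟩ : ∃ j, m = j + 1 := ⟨m - 1, by omega⟩
  have hcons := window_cons row cn j (by omega)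
  have hsnoc := window_snoc row cn j h
  set outv := row[cn]'(by omega) with houtv
  set newv := row[cn + (j + 1)]'(by omega) with hnewv
  set mid := (row.drop (cn + 1)).take j with hmid
  have hczo : pvCZ ((row.drop cn).take (j + 1)) = (if outv = 0 then 1 else 0) + pvCZ mid := by
    rw [hcons, pvCZ, pvCZ, List.count_cons]
    by_cases h0 : outv = 0 <;> simp [h0, beq_iff_eq] <;> push_cast <;> ring
  have hpzo : pvPNZ ((row.drop cn).take (j + 1)) = (if outv = 0 then 1 else outv) * pvPNZ mid := by
    rw [hcons, pvPNZ, pvPNZ, List.filter_cons]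
    by_cases h0 : outv = 0 <;> simp [h0]
  have hczn : pvCZ ((row.drop (cn + 1)).take (j + 1)) = pvCZ mid + (if newv = 0 then 1 else 0) := by
    rw [hsnoc, pvCZ, pvCZ, List.count_append]
    by_cases h0 : newv = 0 <;> simp [h0, beq_iff_eq] <;> push_cast <;> ring
  have hpzn : pvPNZ ((row.drop (cn + 1)).take (j + 1)) = pvPNZ mid * (if newv = 0 then 1 else newv) := by
    rw [hsnoc, pvPNZ, pvPNZ, List.filter_append]
    by_cases h0 : newv = 0 <;> simp [h0]
  by_cases ho : outv = 0 <;> by_cases hn0 : newv = 0 <;>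
    simp only [ho, hn0, if_pos, if_neg, ite_true, ite_false, hczo, hpzo, hczn, hpzn] <;>
    simp [ho, hn0] at hczo hpzo hczn hpzn ⊢ <;>
    all_goals exact Int.mul_fdiv_cancel_left _ ho

-- Source B's column-step function (as in pvRowB)
def pvBStep (number : Int) (row : List Int) (s : (Int × Int) × (List Int × Int)) (c : Int) :
    (Int × Int) × (List Int × Int) :=
  let zp :=
    if c > 0 then
      let outv := PySem.List.pyGetD row (c - 1) 0
      let newv := PySem.List.pyGetD row (c + number - 1) 0
      let zp1 := if outv = 0 then (s.1.1 - 1, s.1.2) else (s.1.1, PySem.Int.floordiv s.1.2 outv)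
      if newv = 0 then (zp1.1 + 1, zp1.2) else (zp1.1, zp1.2 * newv)
    else s.1
  let p := if zp.1 ≠ 0 then (0 : Int) else zp.2
  if p > s.2.2 then (zp, (PySem.List.slice row (some c) (some (c + number)), p))
  else (zp, s.2)

-- M's column-step function (as in pvRowM)
def pvMStep (number : Int) (row : List Int) (st : List Int × Int) (c : Int) : List Int × Int :=
  let window := PySem.List.slice row (some c) (some (c + number))
  let p := window.foldl (fun p v => p * v) 1
  if p > st.2 then (window, p) else st

theorem slice_window (row : List Int) (cn m : Nat) :
    PySem.List.slice row (some (cn : Int)) (some ((cn : Int) + (m : Int))) = (row.drop cn).take m :=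
  PySem.List.slice_natCast_add row cn m

-- one matched step at column cn+1 (so the c > 0 branch fires)
theorem bstep_eq_mstep (m : Nat) (hm : 1 ≤ m) (row : List Int) (cn : Nat)
    (h : cn + 1 + m ≤ row.length) (st : List Int × Int) :
    pvBStep (m : Int) row ((pvCZ ((row.drop cn).take m), pvPNZ ((row.drop cn).take m)), st) ((cn : Int) + 1)
      = ((pvCZ ((row.drop (cn + 1)).take m), pvPNZ ((row.drop (cn + 1)).take m)),
         pvMStep (m : Int) row st ((cn : Int) + 1)) := by
  have hc1 : ((cn : Int) + 1) - 1 = ((cn : Nat) : Int) := by omega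
  have hc2 : ((cn : Int) + 1) + (m : Int) - 1 = (((cn + m : Nat)) : Int) := by push_cast; omega
  have hout : PySem.List.pyGetD row (((cn : Int) + 1) - 1) 0 = row[cn]'(by omega) := by
    rw [hc1, PySem.List.pyGetD_natCast]
    simp [List.getD, List.getElem?_eq_getElem (by omega : cn < row.length)]
  have hnew : PySem.List.pyGetD row (((cn : Int) + 1) + (m : Int) - 1) 0 = row[cn + m]'(by omega) := by
    rw [hc2, PySem.List.pyGetD_natCast]
    simp [List.getD, List.getElem?_eq_getElem (by omega : cn + m < row.length)]
  have hwin : PySem.List.slice row (some ((cn : Int) + 1)) (some (((cn : Int) + 1) + (m : Int)))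
      = (row.drop (cn + 1)).take m := by
    have : ((cn : Int) + 1) = ((cn + 1 : Nat) : Int) := by push_cast; ring
    rw [this, slice_window]
  have hshift := shift_zp row cn m hm h
  simp only at hshift
  unfold pvBStep pvMStep
  simp only [gt_iff_lt, hwin]
  have hcpos : (0 : Int) < (cn : Int) + 1 := by omega
  rw [if_pos hcpos, hout, hnew, hshift]
  have hp : (if (pvCZ ((row.drop (cn + 1)).take m) ≠ 0) then (0 : Int)
      else pvPNZ ((row.drop (cn + 1)).take m)) = ((row.drop (cn + 1)).take m).foldl (· * ·) 1 :=
    prod_char _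
  rw [hp]
  by_cases hcond : st.2 < ((row.drop (cn + 1)).take m).foldl (· * ·) 1 <;>
    simp [hcond]

-- folding matched steps over the consecutive columns cn+1 … cn+k
theorem consec_fold (m : Nat) (hm : 1 ≤ m) (row : List Int) :
    ∀ (k cn : Nat), cn + k + m ≤ row.length →
    ∀ (st : List Int × Int),
      (PySem.List.pyRange ((cn : Int) + 1) ((cn : Int) + 1 + (k : Int)) 1).foldl
          (pvBStep (m : Int) row)
          ((pvCZ ((row.drop cn).take m), pvPNZ ((row.drop cn).take m)), st)
        = ((pvCZ ((row.drop (cn + k)).take m), pvPNZ ((row.drop (cn + k)).take m)),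
           (PySem.List.pyRange ((cn : Int) + 1) ((cn : Int) + 1 + (k : Int)) 1).foldl
             (pvMStep (m : Int) row) st) := by
  intro k
  induction k with
  | zero =>
    intro cn _ st
    rw [PySem.List.pyRange_one_eq_nil (by omega)]
    simp
  | succ j ih =>
    intro cn hb st
    rw [PySem.List.pyRange_one_cons (by push_cast; omega)]
    simp only [List.foldl_cons]
    rw [bstep_eq_mstep m hm row cn (by omega) st]
    have harg : (cn : Int) + 1 + 1 = ((cn + 1 : Nat) : Int) + 1 := by push_cast; ring
    have harg2 : (cn : Int) + 1 + ((j : Nat) + 1 : Nat) = ((cn + 1 : Nat) : Int) + 1 + (j : Int) := by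
      push_cast; ring
    rw [harg, harg2]
    rw [ih (cn + 1) (by omega) (pvMStep (m : Int) row st ((cn : Int) + 1))]
    have : cn + 1 + j = cn + (j + 1) := by omega
    rw [this]

-- per row, M and B agree (for any incoming (best, best_prod) state)
theorem rowM_eq_rowB (number nI : Int) (row : List Int) (hn : 1 ≤ number)
    (hrow : number ≤ nI → nI ≤ (row.length : Int)) (st : List Int × Int) :
    pvRowM number nI row st = pvRowB number (nI - number + 1) row st := by
  obtain ⟨m, rfl⟩ := Int.eq_ofNat_of_zero_le (by omega : (0 : Int) ≤ number)
  have hm : 1 ≤ m := by exact_mod_cast hn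
  by_cases hcols : nI - (m : Int) + 1 > 0
  · -- cols > 0: number ≤ nI ≤ row.length
    have hle : (nI : Int) ≤ (row.length : Int) := hrow (by omega)
    obtain ⟨colsN, hcolsN⟩ := Int.eq_ofNat_of_zero_le (by omega : (0 : Int) ≤ nI - (m : Int) + 1)
    have hcolsN1 : 1 ≤ colsN := by omega
    have hbound : colsN - 1 + m ≤ row.length := by omega
    unfold pvRowM pvRowB
    rw [if_pos hcols, hcolsN]
    -- initial (zeros, prod) is (cz, pnz) of window 0 = row[:number]
    have hinit : (PySem.List.slice row none (some ((m : Nat) : Int))).foldl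
        (fun zp v => if v = 0 then (zp.1 + 1, zp.2) else (zp.1, zp.2 * v)) ((0 : Int), (1 : Int))
        = (pvCZ (row.take m), pvPNZ (row.take m)) := by
      rw [PySem.List.slice_to_natCast, init_zp]
      simp
    -- peel column 0 of both folds
    have hpeel : PySem.List.pyRange 0 ((colsN : Nat) : Int) 1
        = 0 :: PySem.List.pyRange 1 ((colsN : Nat) : Int) 1 := by
      rw [PySem.List.pyRange_one_cons (by exact_mod_cast hcolsN1)]
      norm_num
    rw [hpeel]
    show ((0 : Int) :: PySem.List.pyRange 1 ((colsN : Nat) : Int) 1).foldl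
        (pvMStep (m : Int) row) st
      = (((0 : Int) :: PySem.List.pyRange 1 ((colsN : Nat) : Int) 1).foldl
          (pvBStep (m : Int) row) ((PySem.List.slice row none (some ((m : Nat) : Int))).foldl
            (fun zp v => if v = 0 then (zp.1 + 1, zp.2) else (zp.1, zp.2 * v)) (0, 1), st)).2
    rw [hinit]
    simp only [List.foldl_cons]
    -- column 0 of B: c > 0 is false, zp stays, p is the full product of window 0
    have hstep0B : pvBStep (m : Int) row ((pvCZ (row.take m), pvPNZ (row.take m)), st) 0
        = ((pvCZ (row.take m), pvPNZ (row.take m)), pvMStep (m : Int) row st 0) := by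
      unfold pvBStep pvMStep
      simp only [gt_iff_lt, lt_irrefl, if_neg, ite_false]
      have hw0 : PySem.List.slice row (some (0 : Int)) (some ((0 : Int) + (m : Int)))
          = row.take m := by
        have h0 : (0 : Int) = ((0 : Nat) : Int) := rfl
        rw [h0, slice_window]
        simp
      have hp0 : (if pvCZ (row.take m) ≠ 0 then (0 : Int) else pvPNZ (row.take m))
          = (row.take m).foldl (· * ·) 1 := prod_char _
      rw [hp0, hw0]
      by_cases hcond : st.2 < (row.take m).foldl (· * ·) 1 <;> simp [hcond]
    rw [hstep0B]
    -- remaining columns 1 … colsN-1 are matched shifts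
    have htake : row.take m = (row.drop 0).take m := by simp
    have hrange : PySem.List.pyRange 1 ((colsN : Nat) : Int) 1
        = PySem.List.pyRange (((0 : Nat) : Int) + 1) (((0 : Nat) : Int) + 1 + ((colsN - 1 : Nat) : Int)) 1 := by
      push_cast
      congr 1
      omega
    rw [htake, hrange,
      consec_fold m hm row (colsN - 1) 0 (by omega) (pvMStep (m : Int) row st 0)]
  · -- cols ≤ 0: both are the identity
    unfold pvRowM pvRowB
    rw [if_neg hcols, PySem.List.pyRange_one_eq_nil (by omega)]
    rfl

-- chaining over the rows: A's fold equals B's fold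
theorem rowsfold (number nI : Int) (hn : 1 ≤ number) :
    ∀ (rows : List (List Int)),
      (∀ row ∈ rows, number ≤ nI → nI ≤ (row.length : Int)) →
    ∀ (cur : List Int) (p : Int), p = cur.foldl (· * ·) 1 → cur.length = number.toNat →
      rows.foldl (fun cur row => pvRowA number nI row cur) cur
        = (rows.foldl (fun st row => pvRowB number (nI - number + 1) row st) (cur, p)).1 := by
  intro rows
  induction rows with
  | nil => intro _ cur p hp hl; rfl
  | cons r rs ih =>
    intro hrows cur p hp hl
    have hr := rowA_eq_rowM number nI r hn (hrows r (by simp)) cur p hp hl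
    simp only [List.foldl_cons]
    rw [← rowM_eq_rowB number nI r hn (hrows r (by simp)) (cur, p)]
    rw [hr.1]
    have : pvRowM number nI r (cur, p) = ((pvRowM number nI r (cur, p)).1, (pvRowM number nI r (cur, p)).2) := rfl
    rw [this]
    exact ih (fun row h => hrows row (by simp [h])) _ _ hr.2.1 hr.2.2

-- ===== VERDICT (by name: the statement is the Claim_ definition above) =====
theorem finding_the_x_highest_adjacent_number_0_degree_spec : Claim_equal_finding_the_x_highest_adjacent_number_0_degree := by
  intro number grid_array _ hpre
  unfold Spec_finding_the_x_highest_adjacent_number_0_degree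
  unfold finding_the_x_highest_adjacent_number_0_degree finding_the_x_highest_adjacent_number_0_degree_alt
  rw [PySem.List.foldl_pyRange_zero_pyGetD' grid_array []
    (fun cur row => pvRowA number (grid_array.length : Int) row cur)]
  rcases hpre with ⟨h1, h2⟩
  rcases h1 with rfl | hn
  · rfl
  · have hinit : ((PySem.List.pyRange 0 number 1).map (fun _ => (1 : Int))) = List.replicate number.toNat 1 := by
      rw [List.map_const']
      simp [PySem.List.length_pyRange_one]
    rw [rowsfold number (grid_array.length : Int) hn grid_array
      (fun row hr hle => h2 hle row hr) _ 1
      (by rw [hinit, foldl_ones]) (by rw [hinit]; simp)]
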